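-- pv_equiv track=rewrite | github.com/Coldaine/PersonalParakeet | personalparakeet/command_mode.py | _words_similar
-- ===== SOURCE A (Python) =====
-- def _words_similar(word1: str, word2: str) -> bool:
--     """Check if two words are similar (for handling speech recognition errors)"""
--     # Simple similarity check for common speech recognition errors
--     if len(word1) < 3 or len(word2) < 3:
--         return word1 == word2
--
--     # Check if one word is contained in the other
--     if word1 in word2 or word2 in word1:
--         return True
--
--     # Check for common substitutions
--     substitutions = {
--         'parakeet': ['parrot', 'parachute', 'paraquet', 'parrakeet'],
--         'command': ['commend', 'commands', 'comment']
--     }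
--
--     for canonical, variants in substitutions.items():
--         if word1 == canonical and word2 in variants:
--             return True
--         if word2 == canonical and word1 in variants:
--             return True
--
--     return False
-- ===== SOURCE B (Python) =====
-- # B: per-word labels (group id, is_canonical) replace the pair table:
-- # similar-by-substitution iff same group and exactly one word is the canonical hub.
-- _GROUP = {
--     'parakeet': (0, True),
--     'parrot': (0, False),
--     'parachute': (0, False),
--     'paraquet': (0, False),
--     'parrakeet': (0, False),
--     'command': (1, True),
--     'commend': (1, False),
--     'commands': (1, False),
--     'comment': (1, False),
-- }
--
--
-- def _words_similar(word1: str, word2: str) -> bool: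
--     """Check if two words are similar (for handling speech recognition errors)"""
--     if len(word1) < 3 or len(word2) < 3:
--         return word1 == word2
--     if word1 in word2 or word2 in word1:
--         return True
--     g1 = _GROUP.get(word1)
--     g2 = _GROUP.get(word2)
--     return g1 is not None and g2 is not None and g1[0] == g2[0] and g1[1] != g2[1]
-- ===== Notes on version B (the rewrite author's own statement) =====
-- stated objective: alternative
-- what changed: The nested loop over a canonical->variants dict (pair relation) is replaced by labelling each known word with (group id, is_canonical) and deciding similarity by comparing the two labels: same group and exactly one canonical.
import Mathlib
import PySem

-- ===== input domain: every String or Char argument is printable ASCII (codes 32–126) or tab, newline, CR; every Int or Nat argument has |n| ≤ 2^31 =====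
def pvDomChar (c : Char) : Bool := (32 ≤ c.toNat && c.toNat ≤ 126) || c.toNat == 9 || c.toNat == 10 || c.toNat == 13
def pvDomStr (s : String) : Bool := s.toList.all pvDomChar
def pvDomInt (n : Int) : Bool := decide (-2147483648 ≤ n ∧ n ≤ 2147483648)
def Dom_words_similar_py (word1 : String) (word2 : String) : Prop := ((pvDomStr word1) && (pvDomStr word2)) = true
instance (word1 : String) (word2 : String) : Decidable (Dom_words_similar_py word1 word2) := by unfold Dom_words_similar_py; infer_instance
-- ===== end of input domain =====

-- ===== PORT A =====
-- A-side helpers: the literal substitutions dict and the loop over its items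
def pvSubstitutions : List (String × List String) :=
  [("parakeet", ["parrot", "parachute", "paraquet", "parrakeet"]),
   ("command", ["commend", "commands", "comment"])]

def pvSubsLoop (word1 : String) (word2 : String) : List (String × List String) → Bool
  | [] => false
  | (canonical, variants) :: rest =>
    if word1 == canonical && variants.contains word2 then true
    else if word2 == canonical && variants.contains word1 then true
    else pvSubsLoop word1 word2 rest

def words_similar_py (word1 : String) (word2 : String) : Bool :=
  if PySem.Str.len word1 < 3 || PySem.Str.len word2 < 3 then word1 == word2
  else if PySem.Str.isIn word1 word2 || PySem.Str.isIn word2 word1 then true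
  else
    -- 'for canonical, variants in substitutions.items():' with early returns,
    -- as structural recursion over the items list
    pvSubsLoop word1 word2 (PySem.Dict.ofList pvSubstitutions).items


-- ===== PORT B =====
-- B-side helper: each known word labelled with (group id, is_canonical)
def pvGroup : PySem.Dict String (Int × Bool) := PySem.Dict.ofList
  [("parakeet", (0, true)),
   ("parrot", (0, false)),
   ("parachute", (0, false)),
   ("paraquet", (0, false)),
   ("parrakeet", (0, false)),
   ("command", (1, true)),
   ("commend", (1, false)),
   ("commands", (1, false)),
   ("comment", (1, false))]

def words_similar_py_alt (word1 : String) (word2 : String) : Bool :=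
  if PySem.Str.len word1 < 3 || PySem.Str.len word2 < 3 then word1 == word2
  else if PySem.Str.isIn word1 word2 || PySem.Str.isIn word2 word1 then true
  else
    -- g1 is not None and g2 is not None and g1[0] == g2[0] and g1[1] != g2[1]
    match pvGroup.get? word1, pvGroup.get? word2 with
    | some g1, some g2 => g1.1 == g2.1 && g1.2 != g2.2
    | _, _ => false

-- ===== PRECONDITION & SPEC =====
def Spec_words_similar_py (word1 : String) (word2 : String) (out : Bool) : Prop := out = words_similar_py_alt word1 word2
instance (word1 : String) (word2 : String) (out : Bool) : Decidable (Spec_words_similar_py word1 word2 out) := by unfold Spec_words_similar_py; infer_instance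

-- ===== CLAIM =====
def Claim_equal_words_similar_py : Prop := ∀ (word1 : String) (word2 : String), Dom_words_similar_py word1 word2 → Spec_words_similar_py word1 word2 (words_similar_py word1 word2)

-- ===== LEMMAS AND PROOFS =====
-- A's table words, characterised through B's label dict: each comparison / variant-list
-- membership in A's loop equals a specific label lookup in pvGroup.
theorem pvGroup_mk : pvGroup = PySem.Dict.mk
    [("parakeet", ((0 : Int), true)), ("parrot", (0, false)), ("parachute", (0, false)),
     ("paraquet", (0, false)), ("parrakeet", (0, false)), ("command", (1, true)),
     ("commend", (1, false)), ("commands", (1, false)), ("comment", (1, false))] := by decide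

theorem pvL1 (w : String) : (w == "parakeet") = (pvGroup.get? w == some (0, true)) := by
  rw [pvGroup_mk]; simp only [PySem.Dict.get?_mk_cons]; split_ifs <;> simp_all [PySem.Dict.get?] <;> first | (rename_i h; cases h; decide) | aesop
theorem pvL2 (w : String) : (w == "command") = (pvGroup.get? w == some (1, true)) := by
  rw [pvGroup_mk]; simp only [PySem.Dict.get?_mk_cons]; split_ifs <;> simp_all [PySem.Dict.get?] <;> first | (rename_i h; cases h; decide) | aesop
theorem pvL3 (w : String) :
    (["parrot", "parachute", "paraquet", "parrakeet"].contains w)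
      = (pvGroup.get? w == some (0, false)) := by
  rw [pvGroup_mk]; simp only [PySem.Dict.get?_mk_cons]; split_ifs <;> simp_all [PySem.Dict.get?] <;> first | (rename_i h; cases h; decide) | aesop
theorem pvL4 (w : String) :
    (["commend", "commands", "comment"].contains w)
      = (pvGroup.get? w == some (1, false)) := by
  rw [pvGroup_mk]; simp only [PySem.Dict.get?_mk_cons]; split_ifs <;> simp_all [PySem.Dict.get?] <;> first | (rename_i h; cases h; decide) | aesop

-- get? into pvGroup only takes the five label values below
theorem pvGroup_range (w : String) :
    pvGroup.get? w = none ∨ pvGroup.get? w = some (0, true) ∨ pvGroup.get? w = some (0, false)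
      ∨ pvGroup.get? w = some (1, true) ∨ pvGroup.get? w = some (1, false) := by
  rw [pvGroup_mk]; simp only [PySem.Dict.get?_mk_cons]; split_ifs <;> simp_all [PySem.Dict.get?]

-- A's dict-items loop equals B's label comparison
theorem pvLoop_eq_labels (word1 word2 : String) :
    pvSubsLoop word1 word2 (PySem.Dict.ofList pvSubstitutions).items
      = (match pvGroup.get? word1, pvGroup.get? word2 with
         | some g1, some g2 => g1.1 == g2.1 && g1.2 != g2.2
         | _, _ => false) := by
  have hitems : (PySem.Dict.ofList pvSubstitutions).items = pvSubstitutions := by decide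
  rw [hitems]
  simp only [pvSubstitutions, pvSubsLoop, Bool.if_true_left, Bool.if_false_right]
  rw [show (["parrot", "parachute", "paraquet", "parrakeet"] : List String).contains word2
        = (pvGroup.get? word2 == some (0, false)) from pvL3 word2,
      show (["parrot", "parachute", "paraquet", "parrakeet"] : List String).contains word1
        = (pvGroup.get? word1 == some (0, false)) from pvL3 word1,
      show (["commend", "commands", "comment"] : List String).contains word2
        = (pvGroup.get? word2 == some (1, false)) from pvL4 word2,
      show (["commend", "commands", "comment"] : List String).contains word1
        = (pvGroup.get? word1 == some (1, false)) from pvL4 word1,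
      pvL1 word1, pvL1 word2, pvL2 word1, pvL2 word2]
  rcases pvGroup_range word1 with h1 | h1 | h1 | h1 | h1 <;>
  rcases pvGroup_range word2 with h2 | h2 | h2 | h2 | h2 <;>
    rw [h1, h2] <;> simp

-- ===== VERDICT =====
theorem words_similar_py_spec : Claim_equal_words_similar_py := by
  intro word1 word2 _
  unfold Spec_words_similar_py words_similar_py words_similar_py_alt
  split
  · rfl
  split
  · rfl
  · exact pvLoop_eq_labels word1 word2
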